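-- pv_equiv track=rewrite | github.com/seethersan/pipeline_orchestrator | app/core/dag.py | next_runnables
-- ===== SOURCE A (Python) =====
-- from dataclasses import dataclass
-- from typing import Dict, List, Set, Tuple
--
-- class CycleError(Exception):
--     def __init__(self, cycle_path: List[int]):
--         self.cycle_path = cycle_path
--         super().__init__(f"DAG has a cycle: {' -> '.join(map(str, cycle_path))}")
--
-- @dataclass(frozen=True)
-- class Graph:
--     nodes: Set[int]
--     edges: List[Tuple[int, int]]
--     adj: Dict[int, Set[int]]
--     indegree: Dict[int, int]
--
-- def build_graph(block_ids: List[int], edges: List[Tuple[int, int]]) -> Graph: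
--     nodes = set(block_ids)
--     adj = {b: set() for b in block_ids}
--     indegree = {b: 0 for b in block_ids}
--     for u, v in edges:
--         if u not in nodes or v not in nodes:
--             raise ValueError(f"Edge references unknown node: ({u}, {v})")
--         if u == v:
--             raise CycleError([u, v])
--         if v not in adj[u]:
--             adj[u].add(v)
--             indegree[v] += 1
--     return Graph(nodes=nodes, edges=edges, adj=adj, indegree=indegree)
--
-- def next_runnables(block_ids: List[int], edges: List[Tuple[int, int]], completed: Set[int], running: Set[int] | None = None) -> Set[int]:
--     g = build_graph(block_ids, edges)
--     running = running or set()
--     preds: Dict[int, Set[int]] = {n: set() for n in block_ids}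
--     for u in block_ids:
--         for v in g.adj[u]:
--             preds[v].add(u)
--     out: Set[int] = set()
--     for n in block_ids:
--         if n in completed or n in running:
--             continue
--         if all(p in completed for p in preds[n]):
--             out.add(n)
--     return out
-- ===== SOURCE B (Python) =====
-- from typing import Dict, List, Set, Tuple
-- from dataclasses import dataclass
--
-- class CycleError(Exception):
--     def __init__(self, cycle_path: List[int]):
--         self.cycle_path = cycle_path
--         super().__init__(f"DAG has a cycle: {' -> '.join(map(str, cycle_path))}")
--
-- @dataclass(frozen=True)
-- class Graph:
--     nodes: Set[int]
--     edges: List[Tuple[int, int]]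
--     adj: Dict[int, Set[int]]
--     indegree: Dict[int, int]
--
-- def build_graph(block_ids: List[int], edges: List[Tuple[int, int]]) -> Graph:
--     nodes = set(block_ids)
--     adj = {b: set() for b in block_ids}
--     indegree = {b: 0 for b in block_ids}
--     for u, v in edges:
--         if u not in nodes or v not in nodes:
--             raise ValueError(f"Edge references unknown node: ({u}, {v})")
--         if u == v:
--             raise CycleError([u, v])
--         if v not in adj[u]:
--             adj[u].add(v)
--             indegree[v] += 1
--     return Graph(nodes=nodes, edges=edges, adj=adj, indegree=indegree)
--
-- def next_runnables(block_ids: List[int], edges: List[Tuple[int, int]], completed: Set[int], running: Set[int] | None = None) -> Set[int]: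
--     # Forward pass: a node is blocked iff some non-completed node points at it;
--     # no reverse-predecessor map is ever built.
--     g = build_graph(block_ids, edges)
--     running = running or set()
--     blocked: Set[int] = set()
--     for u in block_ids:
--         if u not in completed:
--             blocked.update(g.adj[u])
--     return {n for n in block_ids if n not in completed and n not in running and n not in blocked}
-- ===== Notes on version B (the rewrite author's own statement) =====
-- stated objective: simpler
-- what changed: B drops A's reverse-predecessor map (dict of predecessor sets plus a per-node all(...) scan) and instead marks successors of non-completed nodes in one forward `blocked` set, then keeps the unblocked, not-completed, not-running nodes; build_graph is reused verbatim so all exceptions match.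
import Mathlib
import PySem

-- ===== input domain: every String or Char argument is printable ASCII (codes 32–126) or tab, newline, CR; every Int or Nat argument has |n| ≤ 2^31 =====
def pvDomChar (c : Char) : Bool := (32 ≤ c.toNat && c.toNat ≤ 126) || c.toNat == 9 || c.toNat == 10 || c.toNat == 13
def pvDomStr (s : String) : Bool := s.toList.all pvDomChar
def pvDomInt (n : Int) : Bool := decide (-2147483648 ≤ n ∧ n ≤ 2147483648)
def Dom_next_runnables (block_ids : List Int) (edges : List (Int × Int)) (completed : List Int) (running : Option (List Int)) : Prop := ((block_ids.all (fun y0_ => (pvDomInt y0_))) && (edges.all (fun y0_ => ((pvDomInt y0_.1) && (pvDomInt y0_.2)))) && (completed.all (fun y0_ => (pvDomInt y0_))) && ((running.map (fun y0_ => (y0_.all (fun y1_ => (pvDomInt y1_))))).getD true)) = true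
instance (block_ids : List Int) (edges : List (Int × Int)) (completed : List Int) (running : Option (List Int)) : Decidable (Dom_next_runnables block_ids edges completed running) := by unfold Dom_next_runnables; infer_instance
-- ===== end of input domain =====

-- B replaces A's reverse-predecessor map and per-node all(...) by one forward pass
-- collecting a `blocked` set (same cost, simpler decomposition); build_graph is kept verbatim.

-- ===== PORT A =====
-- Graph as in the Python dataclass (edges/indegree carried but unused by next_runnables)
structure PyGraph where
  nodes : PySem.Set Int
  edges : List (Int × Int)
  adj : PySem.Dict Int (List Int)
  indegree : PySem.Dict Int Int
deriving Repr, DecidableEq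

-- body of build_graph's edge loop; `none` = the ValueError / CycleError raises
def edgeStep (nodes : PySem.Set Int)
    (st : Option (PySem.Dict Int (List Int) × PySem.Dict Int Int)) (uv : Int × Int) :
    Option (PySem.Dict Int (List Int) × PySem.Dict Int Int) :=
  st.bind fun p =>
    if !(PySem.Set.contains nodes uv.1) || !(PySem.Set.contains nodes uv.2) then none
    else if uv.1 = uv.2 then none
    else
      let s := p.1.getD uv.1 []
      if PySem.Set.contains s uv.2 then some p
      else some (p.1.insert uv.1 (PySem.Set.add s uv.2), p.2.modify uv.2 0 (· + 1))

-- build_graph; `none` exactly where the Python raises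
def buildGraph (block_ids : List Int) (edges : List (Int × Int)) : Option PyGraph :=
  (edges.foldl (edgeStep (PySem.Set.ofList block_ids))
      (some (block_ids.foldl (fun d b => d.insert b []) PySem.Dict.empty,
             block_ids.foldl (fun d b => d.insert b 0) PySem.Dict.empty))).map
    (fun p => ⟨PySem.Set.ofList block_ids, edges, p.1, p.2⟩)

-- `running = running or set()` (shared line of both versions)
def runSet (running : Option (List Int)) : List Int :=
  match running with
  | none => []
  | some r => if r.isEmpty then [] else r

def next_runnables (block_ids : List Int) (edges : List (Int × Int)) (completed : List Int) (running : Option (List Int)) : List Int :=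
  match buildGraph block_ids edges with
  | none => []   -- unreachable under Pre_ (the Python raises here)
  | some g =>
    let run : List Int := runSet running
    let preds0 : PySem.Dict Int (List Int) :=
      block_ids.foldl (fun d n => d.insert n []) PySem.Dict.empty
    let preds : PySem.Dict Int (List Int) :=
      block_ids.foldl
        (fun d u => (g.adj.getD u []).foldl
          (fun d v => d.insert v (PySem.Set.add (d.getD v []) u)) d)
        preds0
    block_ids.foldl
      (fun out n =>
        if completed.contains n || run.contains n then out
        else if (preds.getD n []).all (fun p => completed.contains p) then
          PySem.Set.add out n
        else out)
      ([] : PySem.Set Int)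

-- ===== PORT B =====
def next_runnables_alt (block_ids : List Int) (edges : List (Int × Int)) (completed : List Int) (running : Option (List Int)) : List Int :=
  match buildGraph block_ids edges with
  | none => []   -- unreachable under Pre_ (the Python raises here)
  | some g =>
    let run : List Int := runSet running
    let blocked : PySem.Set Int :=
      block_ids.foldl
        (fun bl u => if completed.contains u then bl
                     else PySem.Set.update bl (g.adj.getD u []))
        ([] : PySem.Set Int)
    block_ids.foldl
      (fun out n =>
        if !(completed.contains n) && !(run.contains n) && !(blocked.contains n) then
          PySem.Set.add out n
        else out)
      ([] : PySem.Set Int)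

-- ===== PRECONDITION & SPEC =====
-- Pre_ excludes exactly the inputs where build_graph raises: an edge endpoint not in
-- block_ids (ValueError) or a self-loop edge (CycleError).
def Pre_next_runnables (block_ids : List Int) (edges : List (Int × Int)) (completed : List Int) (running : Option (List Int)) : Prop :=
  ∀ uv ∈ edges, uv.1 ∈ block_ids ∧ uv.2 ∈ block_ids ∧ uv.1 ≠ uv.2
instance (block_ids : List Int) (edges : List (Int × Int)) (completed : List Int) (running : Option (List Int)) : Decidable (Pre_next_runnables block_ids edges completed running) := by unfold Pre_next_runnables; infer_instance

def pvWitness_next_runnables : List Int × (List (Int × Int)) × List Int × Option (List Int) :=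
  ([1, 2, 3], [(1, 2), (1, 3)], [1], some [2])

def Spec_next_runnables (block_ids : List Int) (edges : List (Int × Int)) (completed : List Int) (running : Option (List Int)) (out : List Int) : Prop := out = next_runnables_alt block_ids edges completed running
instance (block_ids : List Int) (edges : List (Int × Int)) (completed : List Int) (running : Option (List Int)) (out : List Int) : Decidable (Spec_next_runnables block_ids edges completed running out) := by unfold Spec_next_runnables; infer_instance

-- ===== CLAIM (what is proved, stated in full; the proofs are below) =====
def Claim_equal_next_runnables : Prop := ∀ (block_ids : List Int) (edges : List (Int × Int)) (completed : List Int) (running : Option (List Int)), Dom_next_runnables block_ids edges completed running → Pre_next_runnables block_ids edges completed running → Spec_next_runnables block_ids edges completed running (next_runnables block_ids edges completed running)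

-- ===== LEMMAS AND PROOFS =====

-- the initial {b: set() for b in block_ids} dict reads as [] at every key
theorem getD_foldl_insert_nil (l : List Int) (d : PySem.Dict Int (List Int)) (u : Int)
    (h : d.getD u [] = []) :
    (l.foldl (fun d b => d.insert b []) d).getD u [] = [] := by
  induction l generalizing d with
  | nil => exact h
  | cons b l ih =>
      simp only [List.foldl_cons]
      refine ih _ ?_
      rw [PySem.Dict.getD_insert]
      split_ifs <;> simp [h]

-- the edge loop succeeds under Pre_ and its adj dict contains exactly the edges seen
theorem edgeFold_adj (nodes : PySem.Set Int) (edges : List (Int × Int))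
    (hpre : ∀ uv ∈ edges, uv.1 ∈ nodes ∧ uv.2 ∈ nodes ∧ uv.1 ≠ uv.2)
    (adj : PySem.Dict Int (List Int)) (indeg : PySem.Dict Int Int) :
    ∃ adj' indeg', edges.foldl (edgeStep nodes) (some (adj, indeg)) = some (adj', indeg') ∧
      ∀ u v : Int, v ∈ adj'.getD u [] ↔ v ∈ adj.getD u [] ∨ (u, v) ∈ edges := by
  induction edges generalizing adj indeg with
  | nil => exact ⟨adj, indeg, rfl, by simp⟩
  | cons uv es ih =>
      obtain ⟨a, b⟩ := uv
      obtain ⟨h1, h2, h3⟩ := hpre (a, b) (by simp)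
      have hpre' : ∀ x ∈ es, x.1 ∈ nodes ∧ x.2 ∈ nodes ∧ x.1 ≠ x.2 :=
        fun x hx => hpre x (by simp [hx])
      simp only [List.foldl_cons]
      by_cases hmem : b ∈ adj.getD a []
      · have hstep : edgeStep nodes (some (adj, indeg)) (a, b) = some (adj, indeg) := by
          simp [edgeStep, PySem.Set.contains, h1, h2, h3, hmem]
        rw [hstep]
        obtain ⟨adj', indeg', heq, hch⟩ := ih hpre' adj indeg
        refine ⟨adj', indeg', heq, fun u v => ?_⟩
        rw [hch]
        simp only [List.mem_cons, Prod.mk.injEq]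
        have hcase : u = a → v = b → v ∈ adj.getD u [] := by
          rintro rfl rfl; exact hmem
        tauto
      · have hstep : edgeStep nodes (some (adj, indeg)) (a, b) =
            some (adj.insert a (PySem.Set.add (adj.getD a []) b),
                  indeg.modify b 0 (· + 1)) := by
          simp [edgeStep, PySem.Set.contains, h1, h2, h3, hmem]
        rw [hstep]
        obtain ⟨adj', indeg', heq, hch⟩ := ih hpre' _ _
        refine ⟨adj', indeg', heq, fun u v => ?_⟩
        rw [hch, PySem.Dict.getD_insert]
        by_cases hu : u = a
        · rw [if_pos hu]
          subst hu
          simp only [PySem.Set.mem_add, List.mem_cons, Prod.mk.injEq, true_and]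
          tauto
        · simp only [if_neg hu, List.mem_cons, Prod.mk.injEq]
          tauto

-- inner preds loop: `for v in adj[u]: preds[v].add(u)`
theorem predsInner (u : Int) (vs : List Int) (d : PySem.Dict Int (List Int)) (p n : Int) :
    p ∈ (vs.foldl (fun d v => d.insert v (PySem.Set.add (d.getD v []) u)) d).getD n [] ↔
      p ∈ d.getD n [] ∨ (p = u ∧ n ∈ vs) := by
  induction vs generalizing d with
  | nil => simp
  | cons v vs ih =>
      simp only [List.foldl_cons]
      rw [ih, PySem.Dict.getD_insert]
      by_cases hn : n = v
      · rw [if_pos hn]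
        subst hn
        simp only [PySem.Set.mem_add, List.mem_cons]
        tauto
      · simp only [if_neg hn, List.mem_cons]
        tauto

-- outer preds loop: preds[n] holds exactly the seen u with n ∈ adj[u]
theorem predsOuter (a : Int → List Int) (us : List Int) (d : PySem.Dict Int (List Int)) (p n : Int) :
    p ∈ (us.foldl
          (fun d u => (a u).foldl (fun d v => d.insert v (PySem.Set.add (d.getD v []) u)) d) d).getD n [] ↔
      p ∈ d.getD n [] ∨ ∃ u ∈ us, p = u ∧ n ∈ a u := by
  induction us generalizing d with
  | nil => simp
  | cons u us ih =>
      simp only [List.foldl_cons]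
      rw [ih]
      simp only [predsInner, List.mem_cons]
      constructor
      · rintro ((h | h) | ⟨w, hw, h⟩)
        · exact Or.inl h
        · exact Or.inr ⟨u, Or.inl rfl, h⟩
        · exact Or.inr ⟨w, Or.inr hw, h⟩
      · rintro (h | ⟨w, (hw | hw), h⟩)
        · exact Or.inl (Or.inl h)
        · subst hw; exact Or.inl (Or.inr h)
        · exact Or.inr ⟨w, hw, h⟩

-- B's forward pass: blocked holds exactly the successors of seen non-completed nodes
theorem blockedChar (a : Int → List Int) (completed : List Int) (us : List Int)
    (bl : PySem.Set Int) (n : Int) :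
    n ∈ us.foldl
          (fun bl u => if u ∈ completed then bl else PySem.Set.update bl (a u)) bl ↔
      n ∈ bl ∨ ∃ u ∈ us, u ∉ completed ∧ n ∈ a u := by
  induction us generalizing bl with
  | nil => simp
  | cons u us ih =>
      simp only [List.foldl_cons]
      by_cases hu : u ∈ completed
      · rw [if_pos hu, ih]
        simp only [List.mem_cons]
        have : ∀ w, w = u → w ∉ completed → False := by rintro w rfl hw; exact hw hu
        constructor
        · rintro (h | ⟨w, hw, hcw, h⟩)
          · exact Or.inl h
          · exact Or.inr ⟨w, Or.inr hw, hcw, h⟩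
        · rintro (h | ⟨w, (hw | hw), hcw, h⟩)
          · exact Or.inl h
          · exact absurd (this w hw hcw) not_false
          · exact Or.inr ⟨w, hw, hcw, h⟩
      · rw [if_neg hu, ih]
        simp only [PySem.Set.mem_update, List.mem_cons]
        constructor
        · rintro ((h | h) | ⟨w, hw, hcw, h⟩)
          · exact Or.inl h
          · exact Or.inr ⟨u, Or.inl rfl, hu, h⟩
          · exact Or.inr ⟨w, Or.inr hw, hcw, h⟩
        · rintro (h | ⟨w, (hw | hw), hcw, h⟩)
          · exact Or.inl (Or.inl h)
          · subst hw; exact Or.inl (Or.inr h)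
          · exact Or.inr ⟨w, hw, hcw, h⟩

-- ===== VERDICT (by name: the statement is the Claim_ definition above) =====
theorem next_runnables_spec : Claim_equal_next_runnables := by
  intro block_ids edges completed running _ hpre
  unfold Spec_next_runnables
  have hpre' : ∀ uv ∈ edges,
      uv.1 ∈ PySem.Set.ofList block_ids ∧ uv.2 ∈ PySem.Set.ofList block_ids ∧ uv.1 ≠ uv.2 := by
    intro uv huv
    obtain ⟨h1, h2, h3⟩ := hpre uv huv
    exact ⟨(PySem.Set.mem_ofList _ _).2 h1, (PySem.Set.mem_ofList _ _).2 h2, h3⟩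
  obtain ⟨adj', indeg', heq, hch⟩ := edgeFold_adj (PySem.Set.ofList block_ids) edges hpre'
    (block_ids.foldl (fun d b => d.insert b []) PySem.Dict.empty)
    (block_ids.foldl (fun d b => d.insert b 0) PySem.Dict.empty)
  have hadj0 : ∀ u : Int,
      (block_ids.foldl (fun d b => d.insert b []) PySem.Dict.empty).getD u ([] : List Int) = [] :=
    fun u => getD_foldl_insert_nil block_ids PySem.Dict.empty u (by rfl)
  have hadj : ∀ u v : Int, v ∈ adj'.getD u [] ↔ (u, v) ∈ edges := by
    intro u v; rw [hch u v, hadj0 u]; simp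
  have hg : buildGraph block_ids edges =
      some ⟨PySem.Set.ofList block_ids, edges, adj', indeg'⟩ := by
    unfold buildGraph
    rw [heq]
    rfl
  unfold next_runnables next_runnables_alt
  rw [hg]
  simp only
  apply PySem.List.foldl_congr_mem
  intro acc n hn
  simp only [Bool.or_eq_true, Bool.and_eq_true, Bool.not_eq_true',
    List.contains_eq_mem, decide_eq_true_eq, decide_eq_false_iff_not, List.all_eq_true]
  by_cases h1 : n ∈ completed
  · rw [if_pos (Or.inl h1), if_neg (by simp [h1])]
  · by_cases h2 : n ∈ runSet running
    · rw [if_pos (Or.inr h2), if_neg (by simp [h2])]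
    · rw [if_neg (by tauto)]
      by_cases hb : n ∈ block_ids.foldl
          (fun bl u => if u ∈ completed then bl else PySem.Set.update bl (adj'.getD u []))
          ([] : PySem.Set Int)
      · rcases (blockedChar (fun u => adj'.getD u []) completed block_ids [] n).1 hb with
          h | ⟨u, hu, hnc, hmem⟩
        · simp at h
        · have hP : ¬ ∀ x ∈ ((block_ids.foldl
              (fun d u => (adj'.getD u []).foldl
                (fun d v => d.insert v (PySem.Set.add (d.getD v []) u)) d)
              (block_ids.foldl (fun d n => d.insert n []) PySem.Dict.empty)).getD n []),
              x ∈ completed := by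
            intro hall
            exact hnc (hall u (by rw [predsOuter]; exact Or.inr ⟨u, hu, rfl, hmem⟩))
          rw [if_neg hP, if_neg (by
            intro h
            have hnb := h.2
            simp only [PySem.Set.contains, List.contains_eq_mem,
              decide_eq_false_iff_not] at hnb
            exact hnb hb)]
      · have hP : ∀ x ∈ ((block_ids.foldl
            (fun d u => (adj'.getD u []).foldl
              (fun d v => d.insert v (PySem.Set.add (d.getD v []) u)) d)
            (block_ids.foldl (fun d n => d.insert n []) PySem.Dict.empty)).getD n []),
            x ∈ completed := by
          intro x hx
          rw [predsOuter] at hx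
          rcases hx with h | ⟨u, hu, hpx, hmem⟩
          · rw [getD_foldl_insert_nil block_ids PySem.Dict.empty n (by rfl)] at h
            simp at h
          · subst hpx
            by_contra hxc
            exact hb ((blockedChar (fun u => adj'.getD u []) completed block_ids [] n).2
              (Or.inr ⟨x, hu, hxc, hmem⟩))
        have hb' : (block_ids.foldl
            (fun bl u => if u ∈ completed then bl else PySem.Set.update bl (adj'.getD u []))
            ([] : PySem.Set Int)).contains n = false := by
          simp [PySem.Set.contains, List.contains_eq_mem, hb]
        rw [if_pos hP, if_pos ⟨⟨h1, h2⟩, hb'⟩]
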